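-- pv_equiv track=rewrite | github.com/adrienpillou/Advent-of-Code-2021 | day-10/part_two.py | get_complement
-- ===== SOURCE A (Python) =====
-- openings = ["(", "[", "{", "<"]
--
-- closings = [")", "]", "}", ">"]
--
-- def is_complete(line):
--     complete = True
--     for c in closings:
--         if (c in line):
--             return False
--     return True
--
-- def get_complement(line):
--     line_list = list(line)
--     n = 0
--     while(n < len(line_list)):
--         if(len(line_list) <= 1):
--             return line_list[::-1]
--         if(is_complete("".join(line_list))):
--             return line_list[::-1]
--         char = line_list[n]
--         if(char in closings):
--             previous_char = line_list[n-1]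
--             if(previous_char == openings[closings.index(char)]):
--                 del line_list[n-1:n+1]
--                 n = 0
--             else:
--                 return line_list[::-1]
--         else:
--             n += 1
-- ===== SOURCE B (Python) =====
-- openings = ["(", "[", "{", "<"]
--
-- closings = [")", "]", "}", ">"]
--
-- PAIRS = dict(zip(closings, openings))
--
-- def get_complement(line):
--     # Single left-to-right pass with an explicit stack instead of A's
--     # restart-from-zero rescans with in-place deletion.
--     stack = []
--     chars = list(line)
--     for i, ch in enumerate(chars):
--         if ch in PAIRS:
--             if stack and stack[-1] == PAIRS[ch]:
--                 stack.pop()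
--             else:
--                 return (stack + chars[i:])[::-1]
--         else:
--             stack.append(ch)
--     return stack[::-1]
-- ===== Notes on version B (the rewrite author's own statement) =====
-- stated objective: alternative
-- what changed: A repeatedly rescans the list from index 0 after each in-place deletion of a matched adjacent pair; B makes one left-to-right pass keeping an explicit stack of unmatched characters, returning the reversed leftover stack (or, on a corrupt closer, the reversed remainder); Pre_ excludes exactly the fully balanced lines (A returns None, not a list) and the lines where A's line_list[-1] wraparound at n=0 makes it loop forever.
-- outside the precondition, e.g. on get_complement('()'): A returns None, B returns []; on get_complement('([])'): A returns None, B returns []; on get_complement(')('): A does not finish within the time limit, B returns ['(', ')']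
import Mathlib
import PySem

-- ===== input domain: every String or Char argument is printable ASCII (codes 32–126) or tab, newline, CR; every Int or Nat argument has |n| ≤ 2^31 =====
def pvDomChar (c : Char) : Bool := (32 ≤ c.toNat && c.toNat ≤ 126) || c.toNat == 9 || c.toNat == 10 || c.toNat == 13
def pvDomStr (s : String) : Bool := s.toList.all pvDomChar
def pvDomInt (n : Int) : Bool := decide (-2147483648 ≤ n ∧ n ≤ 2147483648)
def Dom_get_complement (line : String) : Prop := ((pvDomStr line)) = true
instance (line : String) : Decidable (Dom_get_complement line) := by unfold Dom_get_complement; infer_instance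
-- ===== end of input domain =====

-- B replaces A's restart-from-zero rescans with in-place pair deletion by a single
-- left-to-right pass with an explicit stack; equivalence is about the return value
-- (neither program observably mutates its argument).

-- ===== PORT A =====
def pvOpenings : List Char := ['(', '[', '{', '<']
def pvClosings : List Char := [')', ']', '}', '>']
-- openings[closings.index(c)] (always guarded in A by `char in closings`)
def pvOpenAt (c : Char) : Option Char := (pvClosings.idxOf? c).bind (fun i => pvOpenings[i]?)
-- is_complete: no closing bracket occurs in the line
def pvIsComplete (l : List Char) : Bool := pvClosings.all (fun c => !(l.contains c))

-- termination measure facts for pvLoopA, named so the recursion cites them by name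
lemma pvDelLen (l : List Char) (n : Nat) (hn : n < l.length) :
    (l.take (n-1) ++ l.drop (n+1)).length < l.length := by
  simp only [List.length_append, List.length_take, List.length_drop]; omega

-- the while loop of A; `del line_list[n-1:n+1]` for n ≥ 1 is take (n-1) ++ drop (n+1)
def pvLoopA (l : List Char) (n : Nat) : List Char :=
  if hn : n < l.length then
    if l.length ≤ 1 then l.reverse
    else if pvIsComplete l then l.reverse
    else
      let c := l[n]
      if pvClosings.contains c then
        match PySem.List.pyGet? l ((n : Int) - 1) with
        | none => []   -- unreachable: l is nonempty here
        | some prev =>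
          if pvOpenAt c = some prev then
            if n = 0 then []
              -- n = 0: Python's `del line_list[-1:1]` removes nothing and the loop never
              -- terminates; such inputs are excluded by Pre_get_complement
            else pvLoopA (l.take (n-1) ++ l.drop (n+1)) 0
          else l.reverse
      else pvLoopA l (n+1)
  else []  -- Python falls out of the while loop and returns None; excluded by Pre_get_complement
termination_by (l.length, l.length - n)
decreasing_by
  · exact Prod.Lex.left _ _ (pvDelLen l n hn)
  · exact Prod.Lex.right _ (Nat.sub_succ_lt_self _ _ hn)

def get_complement (line : String) : List String :=
  (pvLoopA line.toList 0).map (fun c => String.ofList [c])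

-- ===== PORT B =====
-- the stack is kept top-first (the reverse of Source B's list `stack`), so Python's
-- stack[::-1] is `stack` itself and (stack + chars[i:])[::-1] is reverse(chars[i:]) ++ stack
def pvLoopB (stack : List Char) : List Char → List Char
  | [] => stack
  | c :: rest =>
    if pvClosings.contains c then
      match stack with
      | s :: ss => if pvOpenAt c = some s then pvLoopB ss rest else (c :: rest).reverse ++ (s :: ss)
      | [] => (c :: rest).reverse
    else pvLoopB (c :: stack) rest

def get_complement_alt (line : String) : List String :=
  (pvLoopB [] line.toList).map (fun c => String.ofList [c])

-- ===== PRECONDITION & SPEC =====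
-- one step of the standard balanced-brackets (Dyck-word) check: push non-closers,
-- pop a matching opener for a closer, fail otherwise
def pvBalStep (st : Option (List Char)) (c : Char) : Option (List Char) :=
  match st with
  | none => none
  | some s =>
    if pvClosings.contains c then
      match s with
      | t :: ts => if pvOpenAt c = some t then some ts else none
      | [] => none
    else some (c :: s)

-- the line is a fully balanced bracket sequence (everything cancels)
def pvBalanced (l : List Char) : Bool := l.foldl pvBalStep (some []) == some []

-- the unique position (if any) where a closer follows a fully balanced prefix and the
-- line's last character is that closer's matching opener
def pvHangs (l : List Char) : Bool :=
  (List.range l.length).any (fun i =>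
    pvBalanced (l.take i) && l[i]?.any (fun c =>
      pvClosings.contains c && decide (i + 1 < l.length) && (pvOpenAt c == l.getLast?)))

-- Pre_ excludes exactly the inputs on which A returns no list: the fully balanced lines
-- (A's loop empties the list, falls out and returns None) and the lines where a closer
-- follows a fully balanced prefix with the matching opener as last character (there A's
-- `line_list[n-1]` wraps to index -1 at n = 0, `del line_list[-1:1]` deletes nothing, and
-- A loops forever).
def Pre_get_complement (line : String) : Prop :=
  pvBalanced line.toList = false ∧ pvHangs line.toList = false
instance (line : String) : Decidable (Pre_get_complement line) := by
  unfold Pre_get_complement; infer_instance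

def pvWitness_get_complement : String := "[({("

def Spec_get_complement (line : String) (out : List String) : Prop := out = get_complement_alt line
instance (line : String) (out : List String) : Decidable (Spec_get_complement line out) := by unfold Spec_get_complement; infer_instance

-- ===== CLAIM (what is proved, stated in full; the proofs are below) =====
def Claim_equal_get_complement : Prop := ∀ (line : String), Dom_get_complement line → Pre_get_complement line → Spec_get_complement line (get_complement line)

-- ===== LEMMAS AND PROOFS =====

lemma pvIsComplete_of_noclos (Q : List Char) (hQ : ∀ x ∈ Q, pvClosings.contains x = false) :
    pvIsComplete Q = true := by
  simp only [pvIsComplete, List.all_eq_true, Bool.not_eq_eq_eq_not, Bool.not_true]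
  intro c hc
  simp only [List.contains_eq_mem, decide_eq_false_iff_not]
  intro hmem
  have := hQ c hmem
  simp [List.contains_eq_mem, hc] at this

lemma pvLoopA_noclos (Q : List Char) (hQ : ∀ x ∈ Q, pvClosings.contains x = false) :
    pvLoopA Q 0 = Q.reverse := by
  rw [pvLoopA]
  rcases Q with _ | ⟨a, Q'⟩
  · simp
  · simp only [List.length_cons, Nat.zero_lt_succ, dif_pos]
    have hc := pvIsComplete_of_noclos _ hQ
    simp [hc]

lemma pvLoopB_noclos (S : List Char) : ∀ stack, (∀ x ∈ S, pvClosings.contains x = false) →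
    pvLoopB stack S = S.reverse ++ stack := by
  induction S with
  | nil => simp [pvLoopB]
  | cons c rest ih =>
    intro stack hS
    simp only [pvLoopB]
    simp only [hS c (by simp), if_neg Bool.false_ne_true]
    rw [ih _ (fun x hx => hS x (by simp [hx]))]
    simp

lemma pvLoopA_skip (P S : List Char) (hP : ∀ x ∈ P, pvClosings.contains x = false)
    (hS : S ≠ []) : ∀ k, k ≤ P.length → pvLoopA (P ++ S) k = pvLoopA (P ++ S) P.length := by
  have hS1 : 1 ≤ S.length := List.length_pos_iff.mpr hS
  have : ∀ d k, k ≤ P.length → P.length - k = d →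
      pvLoopA (P ++ S) k = pvLoopA (P ++ S) P.length := by
    intro d
    induction d with
    | zero =>
      intro k hk h0
      have he : k = P.length := by omega
      subst he
      rfl
    | succ d ih =>
      intro k hk hd
      have hklt : k < P.length := by omega
      have hlen : k < (P ++ S).length := by simp only [List.length_append]; omega
      have h2 : ¬ (P ++ S).length ≤ 1 := by simp only [List.length_append]; omega
      rw [pvLoopA, dif_pos hlen, if_neg h2]
      by_cases hcpl : pvIsComplete (P ++ S) = true
      · rw [if_pos hcpl, pvLoopA, dif_pos (by simp only [List.length_append]; omega : P.length < (P ++ S).length), if_neg h2, if_pos hcpl]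
      · rw [if_neg hcpl]
        have hchar : pvClosings.contains ((P ++ S)[k]'hlen) = false := by
          rw [List.getElem_append_left hklt]
          exact hP _ (List.getElem_mem hklt)
        rw [if_neg (by simpa using hchar)]
        exact ih (k+1) (by omega) (by omega)
  intro k hk
  exact this (P.length - k) k hk rfl

lemma pvLoop_main (S : List Char) : ∀ P : List Char,
    (∀ x ∈ P, pvClosings.contains x = false) →
    (∀ U c rest', S = U ++ c :: rest' → U.foldl pvBalStep (some P.reverse) = some [] →
      pvClosings.contains c = true → rest' ≠ [] → pvOpenAt c ≠ rest'.getLast?) →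
    pvLoopA (P ++ S) 0 = pvLoopB P.reverse S := by
  induction S with
  | nil =>
    intro P hP _
    rw [List.append_nil, pvLoopA_noclos P hP]
    rfl
  | cons c rest ih =>
    intro P hP NH
    rw [pvLoopA_skip P (c :: rest) hP (List.cons_ne_nil c rest) 0 (Nat.zero_le _)]
    have hlen : P.length < (P ++ c :: rest).length := by
      simp only [List.length_append, List.length_cons]; omega
    rw [pvLoopA, dif_pos hlen]
    by_cases h1 : (P ++ c :: rest).length ≤ 1
    · have hP0 : P = [] := by
        rcases P with _ | ⟨a, P'⟩
        · rfl
        · simp only [List.length_append, List.length_cons] at h1; omega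
      have hr0 : rest = [] := by
        rcases rest with _ | ⟨b, r'⟩
        · rfl
        · subst hP0; simp at h1
      subst hP0; subst hr0
      rw [if_pos h1]
      simp [pvLoopB]
    · rw [if_neg h1]
      by_cases hcpl : pvIsComplete (P ++ c :: rest) = true
      · rw [if_pos hcpl]
        have hnc : ∀ x ∈ c :: rest, pvClosings.contains x = false := by
          intro x hx
          simp only [pvIsComplete, List.all_eq_true, Bool.not_eq_eq_eq_not, Bool.not_true,
            List.contains_eq_mem, decide_eq_false_iff_not] at hcpl
          simp only [List.contains_eq_mem, decide_eq_false_iff_not]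
          intro hxc
          exact hcpl x hxc (by simp [hx])
        rw [pvLoopB_noclos _ _ hnc]
        simp [List.reverse_append]
      · rw [if_neg hcpl]
        have hchar : (P ++ c :: rest)[P.length]'hlen = c := by
          rw [List.getElem_append_right (Nat.le_refl P.length)]
          simp
        rw [hchar]
        by_cases hc : pvClosings.contains c = true
        · rw [if_pos hc]
          rcases P.eq_nil_or_concat with hP0 | ⟨Q, s, hQs⟩
          · subst hP0
            have hr : rest ≠ [] := by
              rcases rest with _ | ⟨b, r'⟩
              · simp at h1
              · exact List.cons_ne_nil b r'
            simp only [List.nil_append, List.length_nil, Nat.cast_zero, zero_sub]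
            rw [PySem.List.pyGet?_neg_one]
            have hgl : (c :: rest).getLast? = rest.getLast? := by
              rcases rest with _ | ⟨b, r'⟩
              · exact absurd rfl hr
              · exact List.getLast?_cons_cons ..
            rw [hgl]
            rcases hz : rest.getLast? with _ | z
            · exact absurd (List.getLast?_eq_none_iff.mp hz) hr
            · have hne : ¬ pvOpenAt c = some z := by
                have := NH [] c rest rfl (by simp [List.foldl]) hc hr
                rw [hz] at this; exact this
              have hc' : c ∈ pvClosings := by simpa using hc
              simp [hne, pvLoopB, hc']
          · rw [List.concat_eq_append] at hQs
            subst hQs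
            have hidx : ((↑(Q ++ [s]).length : Int) - 1) = ((Q.length : Int)) := by
              simp only [List.length_append, List.length_cons, List.length_nil]
              push_cast; ring
            rw [hidx, PySem.List.pyGet?_natCast]
            have hget : ((Q ++ [s]) ++ c :: rest)[Q.length]? = some s := by
              rw [List.getElem?_append_left (by simp)]
              simp
            rw [hget]
            simp only []
            by_cases hm : pvOpenAt c = some s
            · rw [if_pos hm, if_neg (by simp : ¬ (Q ++ [s]).length = 0)]
              have htake : ((Q ++ [s]) ++ c :: rest).take ((Q ++ [s]).length - 1) = Q := by
                simp
              have hdrop : ((Q ++ [s]) ++ c :: rest).drop ((Q ++ [s]).length + 1) = rest := by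
                rw [show (Q ++ [s]) ++ c :: rest = ((Q ++ [s]) ++ [c]) ++ rest from by simp,
                  List.drop_left' (by simp)]
              rw [htake, hdrop]
              have hrevP : (Q ++ [s]).reverse = s :: Q.reverse := by simp
              have NH' : ∀ U c' r', rest = U ++ c' :: r' →
                  U.foldl pvBalStep (some Q.reverse) = some [] →
                  pvClosings.contains c' = true → r' ≠ [] → pvOpenAt c' ≠ r'.getLast? := by
                intro U c' r' hU hfold hc' hr'
                apply NH (c :: U) c' r' (by simp [hU]) _ hc' hr'
                rw [hrevP]
                simp only [List.foldl, pvBalStep, hc, if_pos, hm]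
                exact hfold
              rw [ih Q (fun x hx => hP x (by simp [hx])) NH']
              rw [hrevP]
              simp only [pvLoopB, hc, if_pos, hm]
            · rw [if_neg hm]
              have hrev : (Q ++ [s]).reverse = s :: Q.reverse := by simp
              rw [hrev]
              simp only [pvLoopB, hc, if_true, if_neg hm]
              simp [List.reverse_append]
        · rw [if_neg hc]
          have hr : rest ≠ [] := by
            intro h0
            subst h0
            apply hcpl
            apply pvIsComplete_of_noclos
            intro x hx
            rcases List.mem_append.mp hx with h | h
            · exact hP x h
            · simp only [List.mem_cons, List.not_mem_nil, or_false] at h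
              subst h; simpa using hc
          have hre : P ++ c :: rest = (P ++ [c]) ++ rest := by simp
          have hre2 : P.length + 1 = (P ++ [c]).length := by simp
          rw [hre, hre2]
          have hP' : ∀ x ∈ P ++ [c], pvClosings.contains x = false := by
            intro x hx
            rcases List.mem_append.mp hx with h | h
            · exact hP x h
            · simp only [List.mem_singleton] at h; subst h; simpa using hc
          rw [← pvLoopA_skip (P ++ [c]) rest hP' hr 0 (Nat.zero_le _)]
          have hrev : (P ++ [c]).reverse = c :: P.reverse := by simp
          have NH' : ∀ U c' r', rest = U ++ c' :: r' →
              U.foldl pvBalStep (some (P ++ [c]).reverse) = some [] →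
              pvClosings.contains c' = true → r' ≠ [] → pvOpenAt c' ≠ r'.getLast? := by
            intro U c' r' hU hfold hc' hr'
            apply NH (c :: U) c' r' (by simp [hU]) _ hc' hr'
            simp only [List.foldl, pvBalStep, hc, if_neg Bool.false_ne_true]
            rw [hrev] at hfold
            exact hfold
          rw [ih (P ++ [c]) hP' NH']
          rw [hrev]
          have hc' : c ∉ pvClosings := by simpa using hc
          simp [pvLoopB, hc']

lemma pv_final (line : String) (hpre : Pre_get_complement line) :
    pvLoopA line.toList 0 = pvLoopB [] line.toList := by
  have NH : ∀ U c rest', line.toList = U ++ c :: rest' →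
      U.foldl pvBalStep (some ([] : List Char).reverse) = some [] →
      pvClosings.contains c = true → rest' ≠ [] → pvOpenAt c ≠ rest'.getLast? := by
    intro U c rest' hsplit hfold hc hr heq
    have hhang : pvHangs line.toList = true := by
      rw [pvHangs, List.any_eq_true]
      refine ⟨U.length, ?_, ?_⟩
      · rw [List.mem_range, hsplit]
        simp only [List.length_append, List.length_cons]
        omega
      · have htake : line.toList.take U.length = U := by
          rw [hsplit, List.take_left]
        have hget : line.toList[U.length]? = some c := by
          rw [hsplit, List.getElem?_append_right (Nat.le_refl _)]
          simp
        have hlast : line.toList.getLast? = rest'.getLast? := by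
          rw [hsplit, List.getLast?_append_of_ne_nil U (List.cons_ne_nil c rest')]
          rcases rest' with _ | ⟨b, r'⟩
          · exact absurd rfl hr
          · exact List.getLast?_cons_cons ..
        rw [htake, hget]
        have hbal : pvBalanced U = true := by
          rw [pvBalanced]
          simp only [List.reverse_nil] at hfold
          rw [hfold]
          rfl
        have hlt : U.length + 1 < line.toList.length := by
          rw [hsplit]
          simp only [List.length_append, List.length_cons]
          have : rest' ≠ [] := hr
          have := List.length_pos_iff.mpr this
          omega
        simp only [Option.any_some, hbal, hc, hlast, heq, Bool.and_eq_true, decide_eq_true_eq,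
          beq_self_eq_true, and_true, true_and]
        exact hlt
    rw [hpre.2] at hhang
    exact Bool.false_ne_true hhang
  have := pvLoop_main line.toList [] (by simp) NH
  simpa using this

-- ===== VERDICT (by name: the statement is the Claim_ definition above) =====
theorem get_complement_spec : Claim_equal_get_complement := by
  intro line _ hpre
  unfold Spec_get_complement get_complement get_complement_alt
  rw [pv_final line hpre]
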